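-- pv_equiv track=rewrite | github.com/pypi-data/pypi-mirror-391 | packages/importobot/importobot-0.1.4.tar.gz/importobot-0.1.4/src/importobot/core/zephyr_parsers.py | _handle_unformatted_text
-- ===== SOURCE A (Python) =====
-- from typing import Any, ClassVar
--
-- def _handle_unformatted_text(
--     precondition_text: str, steps: list[dict[str, Any]]
-- ) -> list[dict[str, Any]]:
--     """Handle unformatted text by combining first and last lines."""
--     if len(steps) == 1:
--         # For unformatted text, if there are multiple lines,
--         # combine first and last lines only (test expectation)
--         split_lines = precondition_text.strip().split("\n")
--         non_empty_lines = [line.strip() for line in split_lines if line.strip()]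
--         if len(non_empty_lines) > 1:
--             combined_description = non_empty_lines[0] + " " + non_empty_lines[-1]
--             steps = [{"description": combined_description}]
--
--     return steps
-- ===== SOURCE B (Python) =====
-- def _handle_unformatted_text(precondition_text, steps):
--     """Handle unformatted text by combining first and last lines."""
--     if len(steps) == 1:
--         lines = precondition_text.strip().split("\n")
--         # scan forward for the first non-blank line
--         i = 0
--         while i < len(lines) and not lines[i].strip():
--             i += 1
--         # scan the reversed list for the last non-blank line
--         rev = lines[::-1]
--         k = 0
--         while k < len(rev) and not rev[k].strip():
--             k += 1
--         j = len(lines) - 1 - k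
--         if i < j:
--             steps = [{"description": lines[i].strip() + " " + lines[j].strip()}]
--     return steps
-- ===== Notes on version B (the rewrite author's own statement) =====
-- stated objective: alternative
-- what changed: A filters all lines into a list of non-empty stripped lines, tests its length and indexes it at 0 and -1; B never builds that list: it runs two boundary scans - an index advanced past blank lines from the front, and another over the reversed list - and combines lines[i] and lines[j] when the two positions satisfy i < j.
import Mathlib
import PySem

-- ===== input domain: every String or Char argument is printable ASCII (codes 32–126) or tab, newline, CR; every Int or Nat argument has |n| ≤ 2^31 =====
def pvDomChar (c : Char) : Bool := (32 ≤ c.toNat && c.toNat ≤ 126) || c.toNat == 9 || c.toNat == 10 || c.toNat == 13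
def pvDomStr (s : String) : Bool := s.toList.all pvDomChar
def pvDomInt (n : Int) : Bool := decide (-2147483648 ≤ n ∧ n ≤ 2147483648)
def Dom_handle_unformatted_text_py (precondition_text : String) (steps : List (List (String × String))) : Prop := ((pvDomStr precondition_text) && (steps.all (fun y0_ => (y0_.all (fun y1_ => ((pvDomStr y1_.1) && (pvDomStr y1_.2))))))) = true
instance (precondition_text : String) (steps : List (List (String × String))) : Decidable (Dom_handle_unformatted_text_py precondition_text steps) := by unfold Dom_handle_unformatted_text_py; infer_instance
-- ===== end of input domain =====

-- B replaces A's materialised list of non-empty stripped lines (filter + index 0/-1) by two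
-- boundary scans: advance an index past blank lines from the front, and past blank lines of the
-- reversed list, then compare the two positions (objective: alternative decomposition, same cost).

-- ===== PORT A =====
def handle_unformatted_text_py (precondition_text : String) (steps : List (List (String × String))) : List (List (String × String)) :=
  if steps.length = 1 then
    let split_lines := ((PySem.Str.split? (PySem.Str.strip precondition_text) "\n").getD [])
    let non_empty_lines := split_lines.filterMap (fun line =>
      let s := PySem.Str.strip line
      if s ≠ "" then some s else none)
    if non_empty_lines.length > 1 then
      [[("description", PySem.List.pyGetD non_empty_lines 0 "" ++ " " ++ PySem.List.pyGetD non_empty_lines (-1) "")]]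
    else steps
  else steps

-- ===== PORT B =====
-- the 'while i < len(lines) and not lines[i].strip(): i += 1' loop of Source B
def pvSkipLoop (lines : List String) (i : Nat) : Nat :=
  if h : i < lines.length then
    if PySem.Str.strip lines[i] = "" then pvSkipLoop lines (i + 1) else i
  else i
termination_by lines.length - i

def handle_unformatted_text_py_alt (precondition_text : String) (steps : List (List (String × String))) : List (List (String × String)) :=
  if steps.length = 1 then
    let lines := ((PySem.Str.split? (PySem.Str.strip precondition_text) "\n").getD [])
    let i := pvSkipLoop lines 0
    let rev := ((PySem.List.slice? lines none none (-1)).getD [])   -- lines[::-1]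
    let k := pvSkipLoop rev 0
    let j : Int := (lines.length : Int) - 1 - (k : Int)
    if (i : Int) < j then
      [[("description", PySem.Str.strip (PySem.List.pyGetD lines (i : Int) "") ++ " " ++ PySem.Str.strip (PySem.List.pyGetD lines j ""))]]
    else steps
  else steps

-- ===== PRECONDITION & SPEC =====
def Spec_handle_unformatted_text_py (precondition_text : String) (steps : List (List (String × String))) (out : List (List (String × String))) : Prop := out = handle_unformatted_text_py_alt precondition_text steps
instance (precondition_text : String) (steps : List (List (String × String))) (out : List (List (String × String))) : Decidable (Spec_handle_unformatted_text_py precondition_text steps out) := by unfold Spec_handle_unformatted_text_py; infer_instance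

-- ===== CLAIM (what is proved, stated in full; the proofs are below) =====
def Claim_equal_handle_unformatted_text_py : Prop := ∀ (precondition_text : String) (steps : List (List (String × String))), Dom_handle_unformatted_text_py precondition_text steps → Spec_handle_unformatted_text_py precondition_text steps (handle_unformatted_text_py precondition_text steps)

-- ===== LEMMAS AND PROOFS =====

def pvPB (x : String) : Bool := PySem.Str.strip x == ""

def pvNE (L : List String) : List String :=
  L.filterMap (fun line => let s := PySem.Str.strip line; if s ≠ "" then some s else none)

theorem pvSkipLoop_eq (L : List String) (i : Nat) :
    pvSkipLoop L i = i + ((L.drop i).takeWhile pvPB).length := by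
  fun_induction pvSkipLoop L i with
  | case1 i h hs ih =>
      rw [ih, List.drop_eq_getElem_cons h]
      have hp : pvPB (L[i]) = true := by simp [pvPB, hs]
      rw [List.takeWhile_cons_of_pos hp]
      simp; omega
  | case2 i h hs =>
      have hp : pvPB (L[i]) = false := by simp [pvPB]; exact hs
      rw [List.drop_eq_getElem_cons h, List.takeWhile_cons_of_neg (by simp [hp])]
      simp
  | case3 i h =>
      have : L.drop i = [] := List.drop_eq_nil_of_le (by omega)
      simp [this]

theorem pvNE_dropWhile (L : List String) : pvNE L = pvNE (L.dropWhile pvPB) := by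
  induction L with
  | nil => rfl
  | cons x xs ih =>
      by_cases hx : pvPB x = true
      · have hs : PySem.Str.strip x = "" := by simpa [pvPB] using hx
        rw [List.dropWhile_cons_of_pos hx]
        simp [pvNE, hs] at ih ⊢
        exact ih
      · rw [List.dropWhile_cons_of_neg hx]

theorem pvNE_eq_nil_iff (L : List String) : pvNE L = [] ↔ ∀ x ∈ L, pvPB x = true := by
  induction L with
  | nil => simp [pvNE]
  | cons x xs ih =>
      by_cases hx : PySem.Str.strip x = ""
      · simp [pvNE, hx] at ih ⊢
        simp [ih, pvPB, hx]
      · simp [pvNE, hx, pvPB]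

theorem pvNE_cons_false (c : String) (M : List String) (h : pvPB c = false) :
    pvNE (c :: M) = PySem.Str.strip c :: pvNE M := by
  have hs : PySem.Str.strip c ≠ "" := by simpa [pvPB] using h
  simp [pvNE, hs]

theorem pvTakeWhile_append_all {α : Type} (p : α → Bool) (l₁ l₂ : List α)
    (h : ∀ x ∈ l₁, p x = true) : (l₁ ++ l₂).takeWhile p = l₁ ++ l₂.takeWhile p := by
  induction l₁ with
  | nil => simp
  | cons x xs ih =>
      have hx := h x (by simp)
      simp only [List.cons_append, List.takeWhile_cons_of_pos hx]
      rw [ih (fun y hy => h y (by simp [hy]))]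

theorem pvTakeWhile_append_ex {α : Type} (p : α → Bool) (l₁ l₂ : List α)
    (h : ∃ x ∈ l₁, p x = false) : (l₁ ++ l₂).takeWhile p = l₁.takeWhile p := by
  induction l₁ with
  | nil => obtain ⟨x, hx, _⟩ := h; simp at hx
  | cons x xs ih =>
      by_cases hx : p x = true
      · simp only [List.cons_append, List.takeWhile_cons_of_pos hx]
        obtain ⟨y, hy, hyf⟩ := h
        rcases List.mem_cons.mp hy with rfl | hy'
        · rw [hx] at hyf; cases hyf
        · rw [ih ⟨y, hy', hyf⟩]
      · rw [List.cons_append, List.takeWhile_cons_of_neg hx, List.takeWhile_cons_of_neg hx]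

theorem pvDropWhile_head_false {α : Type} (p : α → Bool) (l : List α) (c : α) (M : List α)
    (h : l.dropWhile p = c :: M) : p c = false := by
  have hne : l.dropWhile p ≠ [] := by simp [h]
  have := List.head_dropWhile_not p hne
  simpa [List.head_eq_iff_head?_eq_some, h] using this

-- ===== VERDICT (by name: the statement is the Claim_ definition above) =====
theorem pvMain (L : List String) (steps : List (List (String × String))) :
    (if (pvNE L).length > 1 then
        [[("description", PySem.List.pyGetD (pvNE L) 0 "" ++ " " ++ PySem.List.pyGetD (pvNE L) (-1) "")]]
      else steps)
    = (if ((pvSkipLoop L 0 : Int) < (L.length : Int) - 1 - (pvSkipLoop L.reverse 0 : Int)) then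
        [[("description", PySem.Str.strip (PySem.List.pyGetD L ((pvSkipLoop L 0 : Nat) : Int) "") ++ " " ++
            PySem.Str.strip (PySem.List.pyGetD L ((L.length : Int) - 1 - (pvSkipLoop L.reverse 0 : Int)) ""))]]
      else steps) := by
  have hT : pvSkipLoop L 0 = (L.takeWhile pvPB).length := by
    simpa using pvSkipLoop_eq L 0
  have hK : pvSkipLoop L.reverse 0 = (L.reverse.takeWhile pvPB).length := by
    simpa using pvSkipLoop_eq L.reverse 0
  rcases hdw : L.dropWhile pvPB with _ | ⟨c, M⟩
  · -- no non-blank line at all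
    have hall : ∀ x ∈ L, pvPB x = true := List.dropWhile_eq_nil_iff.mp hdw
    have hNE : pvNE L = [] := (pvNE_eq_nil_iff L).mpr hall
    have htw : L.takeWhile pvPB = L := List.takeWhile_eq_self_iff.mpr hall
    rw [hNE, if_neg (by simp), if_neg (by rw [hT, hK, htw]; omega)]
  · have hc : pvPB c = false := pvDropWhile_head_false pvPB L c M hdw
    have hsplit : L.takeWhile pvPB ++ c :: M = L := by
      rw [← hdw]; exact List.takeWhile_append_dropWhile
    have hlen : L.length = (L.takeWhile pvPB).length + 1 + M.length := by
      conv_lhs => rw [← hsplit]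
      simp; omega
    have hNE : pvNE L = PySem.Str.strip c :: pvNE M := by
      rw [pvNE_dropWhile, hdw, pvNE_cons_false c M hc]
    have hdropT : L.drop (L.takeWhile pvPB).length = c :: M := by
      have h := List.drop_left (l₁ := List.takeWhile pvPB L) (l₂ := c :: M)
      rwa [hsplit] at h
    have hgetT : PySem.List.pyGetD L ((pvSkipLoop L 0 : Nat) : Int) "" = c := by
      rw [hT, PySem.List.pyGetD_natCast, List.getD_eq_getElem?_getD]
      have : L[(L.takeWhile pvPB).length]? = some c := by
        have h0 : (L.drop (L.takeWhile pvPB).length)[0]? = some c := by rw [hdropT]; rfl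
        rw [List.getElem?_drop] at h0
        simpa using h0
      rw [this]; rfl
    rcases hM : pvNE M with _ | ⟨d, N⟩
    · -- exactly one non-blank line
      have hallM : ∀ x ∈ M, pvPB x = true := (pvNE_eq_nil_iff M).mp hM
      have hrev : L.reverse = M.reverse ++ (c :: (L.takeWhile pvPB).reverse) := by
        conv_lhs => rw [← hsplit]
        simp
      have hkM : pvSkipLoop L.reverse 0 = M.length := by
        rw [hK, hrev, pvTakeWhile_append_all pvPB _ _
            (fun x hx => hallM x (List.mem_reverse.mp hx)),
          List.takeWhile_cons_of_neg (by simp [hc])]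
        simp
      rw [hNE, hM, if_neg (by simp), if_neg (by rw [hT, hkM]; omega)]
    · -- at least two non-blank lines
      have hex : ∃ x ∈ M, pvPB x = false := by
        by_contra hcon
        have : pvNE M = [] := (pvNE_eq_nil_iff M).mpr (fun x hx => by
          cases hpx : pvPB x
          · exact absurd ⟨x, hx, hpx⟩ hcon
          · rfl)
        rw [hM] at this; cases this
      have hrev : L.reverse = M.reverse ++ (c :: (L.takeWhile pvPB).reverse) := by
        conv_lhs => rw [← hsplit]
        simp
      have hkM : pvSkipLoop L.reverse 0 = (M.reverse.takeWhile pvPB).length := by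
        rw [hK, hrev, pvTakeWhile_append_ex pvPB _ _ (by
          obtain ⟨m, hm, hmf⟩ := hex
          exact ⟨m, by simp [hm], hmf⟩)]
      have hklt : pvSkipLoop L.reverse 0 < M.length := by
        rw [hkM]
        have hle : (M.reverse.takeWhile pvPB).length ≤ M.length := by
          simpa using (List.takeWhile_prefix (l := M.reverse) (p := pvPB)).length_le
        rcases lt_or_eq_of_le hle with hlt | heq
        · exact hlt
        · exfalso
          have hpre := List.takeWhile_prefix (l := M.reverse) (p := pvPB)
          have : M.reverse.takeWhile pvPB = M.reverse := hpre.eq_of_length (by simpa using heq)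
          have hall' := List.takeWhile_eq_self_iff.mp this
          obtain ⟨m, hm, hmf⟩ := hex
          have := hall' m (by simp [hm])
          rw [hmf] at this; cases this
      -- the last non-blank line, via the reversed list
      have hRne : L.reverse.dropWhile pvPB ≠ [] := by
        intro hemp
        have hall := List.dropWhile_eq_nil_iff.mp hemp
        obtain ⟨m, hm, hmf⟩ := hex
        have := hall m (by rw [hrev]; simp [hm])
        rw [hmf] at this; cases this
      rcases hdwR : L.reverse.dropWhile pvPB with _ | ⟨e, M'⟩
      · exact absurd hdwR hRne
      have he : pvPB e = false := pvDropWhile_head_false pvPB L.reverse e M' hdwR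
      have hrevNE : pvNE L.reverse = (pvNE L).reverse := by
        unfold pvNE; exact List.filterMap_reverse
      have hNER : (pvNE L).reverse = PySem.Str.strip e :: pvNE M' := by
        rw [← hrevNE, pvNE_dropWhile, hdwR, pvNE_cons_false e M' he]
      have hdropK : L.reverse.drop (pvSkipLoop L.reverse 0) = e :: M' := by
        have h := List.drop_left (l₁ := List.takeWhile pvPB L.reverse)
          (l₂ := List.dropWhile pvPB L.reverse)
        rw [List.takeWhile_append_dropWhile] at h
        rw [hK, h, hdwR]
      have hkL : pvSkipLoop L.reverse 0 < L.length := by omega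
      have hgetJ : PySem.List.pyGetD L ((L.length : Int) - 1 - (pvSkipLoop L.reverse 0 : Int)) "" = e := by
        have hidx : ((L.length : Int) - 1 - (pvSkipLoop L.reverse 0 : Int))
            = ((L.length - 1 - pvSkipLoop L.reverse 0 : Nat) : Int) := by omega
        rw [hidx, PySem.List.pyGetD_natCast, List.getD_eq_getElem?_getD]
        have hjlt : L.length - 1 - pvSkipLoop L.reverse 0 < L.length := by omega
        have hRk : L.reverse[pvSkipLoop L.reverse 0]? = some e := by
          have h0 : (L.reverse.drop (pvSkipLoop L.reverse 0))[0]? = some e := by rw [hdropK]; rfl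
          rw [List.getElem?_drop] at h0
          simpa using h0
        have hrevElem : L.reverse[pvSkipLoop L.reverse 0]'(by simpa using hkL)
            = L[L.length - 1 - pvSkipLoop L.reverse 0]'hjlt := List.getElem_reverse _
        rw [List.getElem?_eq_getElem (by simpa using hkL), hrevElem] at hRk
        rw [List.getElem?_eq_getElem hjlt]
        simpa using hRk
      have hNEne : pvNE L ≠ [] := by rw [hNE]; simp
      have hlast : PySem.List.pyGetD (pvNE L) (-1) "" = PySem.Str.strip e := by
        rw [PySem.List.pyGetD_neg_one _ _ hNEne, List.getLast_eq_head_reverse,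
          List.head_eq_iff_head?_eq_some, hNER]
        rfl
      rw [if_pos (by rw [hNE, hM]; simp), if_pos (by omega), hgetT, hgetJ, hlast, hNE,
        PySem.List.pyGetD_zero_cons]

theorem handle_unformatted_text_py_spec : Claim_equal_handle_unformatted_text_py := by
  intro t steps _
  unfold Spec_handle_unformatted_text_py handle_unformatted_text_py handle_unformatted_text_py_alt
  by_cases hl : steps.length = 1
  · rw [if_pos hl, if_pos hl]
    generalize ((PySem.Str.split? (PySem.Str.strip t) "\n").getD []) = L
    show (if (pvNE L).length > 1 then
        [[("description", PySem.List.pyGetD (pvNE L) 0 "" ++ " " ++ PySem.List.pyGetD (pvNE L) (-1) "")]]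
      else steps)
    = (if ((pvSkipLoop L 0 : Int) < (L.length : Int) - 1 -
          (pvSkipLoop ((PySem.List.slice? L none none (-1)).getD []) 0 : Int)) then
        [[("description", PySem.Str.strip (PySem.List.pyGetD L ((pvSkipLoop L 0 : Nat) : Int) "") ++ " " ++
            PySem.Str.strip (PySem.List.pyGetD L ((L.length : Int) - 1 -
              (pvSkipLoop ((PySem.List.slice? L none none (-1)).getD []) 0 : Int)) ""))]]
      else steps)
    rw [PySem.List.slice?_none_none_neg_one, Option.getD_some]
    exact pvMain L steps
  · rw [if_neg hl, if_neg hl]
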